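-- pv_equiv track=rewrite | github.com/leogjhuang/stockfish | stockfish/bash.py | getRunReturnStatementIndex
-- ===== SOURCE A (Python) =====
-- def getRunReturnStatementIndex(lines):
--     seenRunFunction = False
--     for i, line in enumerate(lines):
--         if 'run(self, state: TradingState)' in line:
--             seenRunFunction = True
--         if seenRunFunction and 'return result' in line:
--             return i
--
--     # This should never be called
--     return None
-- ===== SOURCE B (Python) =====
-- def getRunReturnStatementIndex(lines):
--     # Right-to-left suffix DP: firstRet = first 'return result' index in the
--     # current suffix; ans = answer for the current suffix.
--     firstRet = None
--     ans = None
--     for i in range(len(lines) - 1, -1, -1):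
--         line = lines[i]
--         if 'return result' in line:
--             firstRet = i
--         if 'run(self, state: TradingState)' in line:
--             ans = firstRet
--     return ans
-- ===== Notes on version B (the rewrite author's own statement) =====
-- stated objective: alternative
-- what changed: Replaces A's forward flag-latched scan with a single right-to-left pass (dynamic programming on suffixes) that maintains the first 'return result' index of the suffix and overwrites the answer each time a run() signature line is seen, so the final overwrite is the earliest run line.
import Mathlib
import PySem

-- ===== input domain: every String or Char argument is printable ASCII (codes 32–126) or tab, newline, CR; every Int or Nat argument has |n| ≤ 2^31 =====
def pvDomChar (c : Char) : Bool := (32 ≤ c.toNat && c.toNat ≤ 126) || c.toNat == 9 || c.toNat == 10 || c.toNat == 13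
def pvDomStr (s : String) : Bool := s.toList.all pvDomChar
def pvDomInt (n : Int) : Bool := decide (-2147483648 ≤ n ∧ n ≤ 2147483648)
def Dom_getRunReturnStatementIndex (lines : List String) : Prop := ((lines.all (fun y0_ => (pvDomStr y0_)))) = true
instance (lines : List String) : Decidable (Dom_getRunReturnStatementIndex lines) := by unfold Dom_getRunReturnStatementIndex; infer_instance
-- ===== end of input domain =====

-- B replaces A's forward flag-latched scan by a single right-to-left pass (suffix DP)
-- maintaining the first 'return result' index of the suffix and the answer; objective: alternative.

-- ===== PORT A =====
-- A's loop: index i, latch seenRunFunction, one forward pass.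
def pvGoA (i : Int) (seen : Bool) : List String → Option Int
  | [] => none
  | l :: t =>
    let seen' := if PySem.Str.isIn "run(self, state: TradingState)" l then true else seen
    if seen' && PySem.Str.isIn "return result" l then some i else pvGoA (i + 1) seen' t

def getRunReturnStatementIndex (lines : List String) : Option Int :=
  pvGoA 0 false lines

-- ===== PORT B =====
-- Source B's reverse loop as structural recursion (recursing first = processing later
-- indices first, exactly the right-to-left order): returns (firstRet, ans) for the
-- suffix starting at index i.
def pvScanB (i : Int) : List String → Option Int × Option Int
  | [] => (none, none)
  | l :: t =>
    let p := pvScanB (i + 1) t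
    let firstRet := if PySem.Str.isIn "return result" l then some i else p.1
    let ans := if PySem.Str.isIn "run(self, state: TradingState)" l then firstRet else p.2
    (firstRet, ans)

def getRunReturnStatementIndex_alt (lines : List String) : Option Int :=
  (pvScanB 0 lines).2

-- ===== PRECONDITION & SPEC =====
def Spec_getRunReturnStatementIndex (lines : List String) (out : Option Int) : Prop := out = getRunReturnStatementIndex_alt lines
instance (lines : List String) (out : Option Int) : Decidable (Spec_getRunReturnStatementIndex lines out) := by unfold Spec_getRunReturnStatementIndex; infer_instance

-- ===== CLAIM =====
def Claim_equal_getRunReturnStatementIndex : Prop := ∀ (lines : List String), Dom_getRunReturnStatementIndex lines → Spec_getRunReturnStatementIndex lines (getRunReturnStatementIndex lines)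

-- ===== LEMMAS AND PROOFS =====
-- The invariant: A's loop with the latch set is B's firstRet component,
-- and A's loop with the latch unset is B's ans component.
theorem pvGoA_pvScanB (ls : List String) : ∀ i : Int,
    pvGoA i true ls = (pvScanB i ls).1 ∧ pvGoA i false ls = (pvScanB i ls).2 := by
  induction ls with
  | nil => intro i; exact ⟨rfl, rfl⟩
  | cons l t ih =>
    intro i
    obtain ⟨h1, h2⟩ := ih (i + 1)
    constructor
    · simp only [pvGoA, pvScanB]
      split_ifs with hret hrun hrun <;> simp_all
    · simp only [pvGoA, pvScanB]
      split_ifs with hrun hret hret <;> simp_all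

-- ===== VERDICT =====
theorem getRunReturnStatementIndex_spec : Claim_equal_getRunReturnStatementIndex := by
  intro lines _
  exact (pvGoA_pvScanB lines 0).2
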